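-- pv_equiv track=rewrite | github.com/SophiaHerrington/Small-Projects-Python- | BinaryAdder.py | myfunction
-- ===== SOURCE A (Python) =====
-- def myfunction(A1):
--     end = 0
--     counter = 0
--     for i in range (len(A1)):
--         I1 = A1[i]
--         if I1 ==0:
--             counter += 1
--         else:
--             if counter > end:
--                 end = counter
--                 counter = 0
--             else:
--                 counter = 0
--     return end
-- ===== SOURCE B (Python) =====
-- def myfunction(A1):
--     pos = [i for i, x in enumerate(A1) if x != 0]
--     if not pos:
--         return 0
--     best = pos[0]
--     prev = pos[0]
--     for p in pos[1:]:
--         gap = p - prev - 1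
--         if gap > best:
--             best = gap
--         prev = p
--     return best
-- ===== Notes on version B (the rewrite author's own statement) =====
-- stated objective: alternative
-- what changed: Instead of counting zeros element-by-element with an end/counter state machine, B collects the indices of all non-zero elements in one pass and takes the maximum of the leading-zero count and the gaps between consecutive non-zero positions (trailing zeros are naturally never measured).
import Mathlib
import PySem

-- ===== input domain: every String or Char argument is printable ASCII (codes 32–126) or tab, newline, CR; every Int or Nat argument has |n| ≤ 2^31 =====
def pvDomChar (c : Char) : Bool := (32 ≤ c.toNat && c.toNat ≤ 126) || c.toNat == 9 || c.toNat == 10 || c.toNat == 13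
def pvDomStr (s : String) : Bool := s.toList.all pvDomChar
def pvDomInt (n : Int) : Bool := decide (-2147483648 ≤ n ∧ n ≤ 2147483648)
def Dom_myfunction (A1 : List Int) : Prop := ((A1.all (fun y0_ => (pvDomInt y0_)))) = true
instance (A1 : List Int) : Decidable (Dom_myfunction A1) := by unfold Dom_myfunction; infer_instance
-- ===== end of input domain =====

-- B replaces A's end/counter state machine by a positions-and-gaps scan: collect the
-- indices of the non-zero elements, then take the max of the leading index and the
-- gaps between consecutive non-zero indices (same O(n) cost, different decomposition).

-- ===== PORT A =====
-- the for-loop over range(len(A1)) reading A1[i], as a fold over A1 with state (end, counter)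
def myfunction (A1 : List Int) : Int :=
  (A1.foldl (fun (s : Int × Int) I1 =>
      if I1 = 0 then (s.1, s.2 + 1)
      else if s.2 > s.1 then (s.2, 0) else (s.1, 0)) (0, 0)).1

-- ===== PORT B =====
-- B-side helpers: the comprehension [i for i,x in enumerate(A1) if x != 0] (start index generalized)
def posB (s : Int) (xs : List Int) : List Int :=
  (PySem.List.enumerate xs s).filterMap (fun q => if q.2 ≠ 0 then some q.1 else none)

-- the 'for p in pos[1:]' loop with state (best, prev)
def loopB : Int → Int → List Int → Int
  | best, _, [] => best
  | best, prev, p :: ps => loopB (if p - prev - 1 > best then p - prev - 1 else best) p ps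

def myfunction_alt (A1 : List Int) : Int :=
  match posB 0 A1 with
  | [] => 0
  | p :: ps => loopB p p ps

-- ===== PRECONDITION & SPEC =====
def Spec_myfunction (A1 : List Int) (out : Int) : Prop := out = myfunction_alt A1
instance (A1 : List Int) (out : Int) : Decidable (Spec_myfunction A1 out) := by unfold Spec_myfunction; infer_instance

-- ===== CLAIM (what is proved, stated in full; the proofs are below) =====
def Claim_equal_myfunction : Prop := ∀ (A1 : List Int), Dom_myfunction A1 → Spec_myfunction A1 (myfunction A1)

-- ===== LEMMAS AND PROOFS =====

-- A's loop as structural recursion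
def runA : Int → Int → List Int → Int
  | e, _, [] => e
  | e, c, x :: xs => if x = 0 then runA e (c + 1) xs else runA (max e c) 0 xs

theorem foldA_eq (xs : List Int) : ∀ e c : Int,
    (xs.foldl (fun (s : Int × Int) I1 =>
      if I1 = 0 then (s.1, s.2 + 1)
      else if s.2 > s.1 then (s.2, 0) else (s.1, 0)) (e, c)).1 = runA e c xs := by
  induction xs with
  | nil => intro e c; simp [runA]
  | cons x xs ih =>
    intro e c
    simp only [List.foldl_cons, runA]
    by_cases hx : x = 0
    · simp [hx, ih]
    · have hmax : (if c > e then ((c : Int), (0 : Int)) else (e, 0)) = (max e c, 0) := by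
        split_ifs with h <;> simp <;> omega
      simp [hx, hmax, ih]

-- "zeros between nonzeros" value of A's loop from state counter = c; -1 when no nonzero remains
def gRun : Int → List Int → Int
  | _, [] => -1
  | c, x :: xs => if x = 0 then gRun (c + 1) xs else max c (gRun 0 xs)

theorem runA_eq_max (xs : List Int) : ∀ e c : Int, -1 ≤ e →
    runA e c xs = max e (gRun c xs) := by
  induction xs with
  | nil => intro e c he; simp [runA, gRun]; omega
  | cons x xs ih =>
    intro e c he
    by_cases hx : x = 0
    · simp [runA, gRun, hx, ih _ _ he]
    · have h1 : -1 ≤ max e c := le_trans he (le_max_left _ _)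
      simp only [runA, gRun, hx, if_false]
      rw [ih _ _ h1, max_assoc]

theorem loopB_step (best prev p : Int) (ps : List Int) :
    loopB best prev (p :: ps) = loopB (max best (p - prev - 1)) p ps := by
  have : (if p - prev - 1 > best then p - prev - 1 else best) = max best (p - prev - 1) := by
    split_ifs with h <;> omega
  simp [loopB, this]

theorem loopB_max (ps : List Int) : ∀ a b prev : Int,
    loopB (max a b) prev ps = max a (loopB b prev ps) := by
  induction ps with
  | nil => intro a b prev; simp [loopB]
  | cons p ps ih =>
    intro a b prev
    rw [loopB_step, loopB_step, max_assoc, ih]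

theorem loopB_ge (ps : List Int) : ∀ best prev : Int, best ≤ loopB best prev ps := by
  induction ps with
  | nil => intro best prev; simp [loopB]
  | cons p ps ih =>
    intro best prev
    rw [loopB_step]
    exact le_trans (le_max_left _ _) (ih _ _)

theorem posB_cons (s x : Int) (xs : List Int) :
    posB s (x :: xs) = if x ≠ 0 then s :: posB (s + 1) xs else posB (s + 1) xs := by
  simp only [posB, PySem.List.enumerate_cons, List.filterMap_cons]
  split_ifs with h <;> simp_all

theorem posB_ge (xs : List Int) : ∀ s p : Int, p ∈ posB s xs → s ≤ p := by
  induction xs with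
  | nil => intro s p hp; simp [posB, PySem.List.enumerate_nil] at hp
  | cons x xs ih =>
    intro s p hp
    rw [posB_cons] at hp
    split_ifs at hp with h
    · rcases List.mem_cons.1 hp with rfl | hp
      · exact le_refl p
      · exact le_trans (show s ≤ s + 1 by omega) (ih (s + 1) p hp)
    · exact le_trans (show s ≤ s + 1 by omega) (ih (s + 1) p hp)

theorem gRun_cons (c x : Int) (xs : List Int) :
    gRun c (x :: xs) = if x = 0 then gRun (c + 1) xs else max c (gRun 0 xs) := rfl

theorem gRun_eq_posB (xs : List Int) : ∀ c s : Int, 0 ≤ c →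
    gRun c xs = (match posB s xs with
      | [] => -1
      | p :: ps => loopB (c + p - s) p ps) := by
  induction xs with
  | nil => intro c s _; simp [gRun, posB, PySem.List.enumerate_nil]
  | cons x xs ih =>
    intro c s hc
    rw [posB_cons, gRun_cons]
    by_cases hx : x = 0
    · rw [if_pos hx, if_neg (by simp [hx])]
      rw [ih (c + 1) (s + 1) (by omega)]
      rcases h : posB (s + 1) xs with _ | ⟨p, ps⟩
      · rfl
      · show loopB (c + 1 + p - (s + 1)) p ps = loopB (c + p - s) p ps
        have he : c + 1 + p - (s + 1) = c + p - s := by omega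
        rw [he]
    · rw [if_neg hx, if_pos hx]
      rw [ih 0 (s + 1) le_rfl]
      rcases h : posB (s + 1) xs with _ | ⟨p, ps⟩
      · show max c (-1) = loopB (c + s - s) s []
        simp [loopB]; omega
      · show max c (loopB (0 + p - (s + 1)) p ps) = loopB (c + s - s) s (p :: ps)
        rw [loopB_step]
        have h1 : c + s - s = c := by omega
        have h2 : (0 : Int) + p - (s + 1) = p - s - 1 := by omega
        rw [h1, h2, ← loopB_max]

-- ===== VERDICT (by name: the statement is the Claim_ definition above) =====
theorem myfunction_spec : Claim_equal_myfunction := by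
  intro A1 _
  unfold Spec_myfunction myfunction myfunction_alt
  rw [foldA_eq, runA_eq_max A1 0 0 (by omega), gRun_eq_posB A1 0 0 le_rfl]
  rcases h : posB 0 A1 with _ | ⟨p, ps⟩
  · simp
  · simp only
    have hp : 0 ≤ p := posB_ge A1 0 p (h ▸ List.mem_cons_self)
    have h0 : (0 : Int) + p - 0 = p := by omega
    rw [h0]
    have := loopB_ge ps p p
    omega
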